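-- pv_equiv track=rewrite | github.com/sksmslhy/Java_Lexical_and_Syntax_Analyzer | syntax analyzer/lexical_analyzer.py | isSingleCharacter
-- ===== SOURCE A (Python) =====
-- ALPHABET = ['a', 'b', 'c', 'd', 'e', 'f', 'g', 'h', 'i', 'j', 'k', 'l', 'm', 'n', 'o', 'p', 'q', 'r', 's', 't', 'u', 'v',
--           'w', 'x', 'y', 'z',
--           'A', 'B', 'C', 'D', 'E', 'F', 'G', 'H', 'I', 'J', 'K', 'L', 'M', 'N', 'O', 'P', 'Q', 'R', 'S', 'T', 'U', 'V',
--           'W', 'X', 'Y', 'Z']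
--
-- ZERO = ['0']
--
-- NON_ZERO = ['1', '2', '3', '4', '5', '6', '7', '8', '9']
--
-- QUOTE = ["'"]
--
-- WHITE_SPACE = [' ', '\t', '\n']
--
-- def isSingleCharacter(token):
--     state = ['T0', 'T1', 'T2', 'T3', 'T4', 'T5', 'T6']
--     locate = state[0]
--     for value in token:
--         if locate == state[0]:
--             if value in QUOTE:
--                 locate = state[1]
--             else:
--                 return False
--         elif locate == state[1]:
--             if value in ZERO:
--                 locate = state[2]
--             elif value in NON_ZERO:
--                 locate = state[3]
--             elif value in ALPHABET:
--                 locate = state[4]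
--             elif value in WHITE_SPACE:
--                 locate = state[5]
--             else:
--                 return False
--         elif locate == state[2]:
--             if value in QUOTE:
--                 locate = state[6]
--             else:
--                 return False
--         elif locate == state[3]:
--             if value in QUOTE:
--                 locate = state[6]
--             else:
--                 return False
--         elif locate == state[4]:
--             if value in QUOTE:
--                 locate = state[6]
--             else:
--                 return False
--         elif locate == state[5]:
--             if value in QUOTE:
--                 locate = state[6]
--             else:
--                 return False
--         else:
--             return False
--
--     if locate == state[6]:
--         return True
--     else:
--         return False
-- ===== SOURCE B (Python) =====
-- _MIDDLE = set("0123456789abcdefghijklmnopqrstuvwxyzABCDEFGHIJKLMNOPQRSTUVWXYZ \t\n")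
--
-- def isSingleCharacter(token):
--     return len(token) == 3 and token[0] == "'" and token[2] == "'" and token[1] in _MIDDLE
-- ===== Notes on version B (the rewrite author's own statement) =====
-- stated objective: simpler
-- what changed: Replaced the 7-state DFA loop with a closed-form check: length 3, quotes at both ends, and middle character in a precomputed set of letters/digits/whitespace.
import Mathlib
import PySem

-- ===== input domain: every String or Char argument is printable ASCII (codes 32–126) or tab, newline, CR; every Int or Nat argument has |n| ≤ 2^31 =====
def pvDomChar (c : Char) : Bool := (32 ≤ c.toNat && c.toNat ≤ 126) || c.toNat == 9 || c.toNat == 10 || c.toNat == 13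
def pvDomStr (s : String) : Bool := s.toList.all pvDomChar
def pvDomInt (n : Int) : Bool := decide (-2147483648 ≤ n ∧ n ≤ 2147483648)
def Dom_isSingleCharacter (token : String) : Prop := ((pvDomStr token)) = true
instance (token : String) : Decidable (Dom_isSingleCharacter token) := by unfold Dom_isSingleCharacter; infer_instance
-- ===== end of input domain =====

-- B replaces A's 7-state DFA loop by a closed-form length/positional check; objective: simpler.

-- ===== PORT A =====
def pyALPHABET : List Char :=
  ['a','b','c','d','e','f','g','h','i','j','k','l','m','n','o','p','q','r','s','t','u','v',
   'w','x','y','z',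
   'A','B','C','D','E','F','G','H','I','J','K','L','M','N','O','P','Q','R','S','T','U','V',
   'W','X','Y','Z']
def pyZERO : List Char := ['0']
def pyNON_ZERO : List Char := ['1','2','3','4','5','6','7','8','9']
def pyQUOTE : List Char := ['\'']
def pyWHITE_SPACE : List Char := [' ', '\t', '\n']

def pyState : List String := ["T0","T1","T2","T3","T4","T5","T6"]

-- the 'for value in token' loop; early 'return False' = returning false from the recursion
def isSingleCharacterLoop (locate : String) (cs : List Char) : Bool :=
  match cs with
  | [] => if locate == (pyState.getD 6 "") then true else false
  | value :: rest =>
    if locate == (pyState.getD 0 "") then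
      if pyQUOTE.contains value then isSingleCharacterLoop (pyState.getD 1 "") rest else false
    else if locate == (pyState.getD 1 "") then
      if pyZERO.contains value then isSingleCharacterLoop (pyState.getD 2 "") rest
      else if pyNON_ZERO.contains value then isSingleCharacterLoop (pyState.getD 3 "") rest
      else if pyALPHABET.contains value then isSingleCharacterLoop (pyState.getD 4 "") rest
      else if pyWHITE_SPACE.contains value then isSingleCharacterLoop (pyState.getD 5 "") rest
      else false
    else if locate == (pyState.getD 2 "") then
      if pyQUOTE.contains value then isSingleCharacterLoop (pyState.getD 6 "") rest else false
    else if locate == (pyState.getD 3 "") then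
      if pyQUOTE.contains value then isSingleCharacterLoop (pyState.getD 6 "") rest else false
    else if locate == (pyState.getD 4 "") then
      if pyQUOTE.contains value then isSingleCharacterLoop (pyState.getD 6 "") rest else false
    else if locate == (pyState.getD 5 "") then
      if pyQUOTE.contains value then isSingleCharacterLoop (pyState.getD 6 "") rest else false
    else false

def isSingleCharacter (token : String) : Bool :=
  isSingleCharacterLoop (pyState.getD 0 "") token.toList

-- ===== PORT B =====
def pyMIDDLE : PySem.Set Char :=
  PySem.Set.ofList "0123456789abcdefghijklmnopqrstuvwxyzABCDEFGHIJKLMNOPQRSTUVWXYZ \t\n".toList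

def isSingleCharacter_alt (token : String) : Bool :=
  let cs := token.toList
  cs.length == 3 && cs.getD 0 ' ' == '\'' && cs.getD 2 ' ' == '\''
    && PySem.Set.contains pyMIDDLE (cs.getD 1 ' ')

-- ===== PRECONDITION & SPEC =====
def Spec_isSingleCharacter (token : String) (out : Bool) : Prop := out = isSingleCharacter_alt token
instance (token : String) (out : Bool) : Decidable (Spec_isSingleCharacter token out) := by unfold Spec_isSingleCharacter; infer_instance

-- ===== CLAIM (what is proved, stated in full; the proofs are below) =====
def Claim_equal_isSingleCharacter : Prop := ∀ (token : String), Dom_isSingleCharacter token → Spec_isSingleCharacter token (isSingleCharacter token)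

-- ===== LEMMAS AND PROOFS =====


theorem loopT0 (v : Char) (rest : List Char) :
    isSingleCharacterLoop "T0" (v :: rest)
      = if v == '\'' then isSingleCharacterLoop "T1" rest else false := by
  simp [isSingleCharacterLoop, pyState, pyQUOTE]

theorem loopT1 (v : Char) (rest : List Char) :
    isSingleCharacterLoop "T1" (v :: rest)
      = (if pyZERO.contains v then isSingleCharacterLoop "T2" rest
         else if pyNON_ZERO.contains v then isSingleCharacterLoop "T3" rest
         else if pyALPHABET.contains v then isSingleCharacterLoop "T4" rest
         else if pyWHITE_SPACE.contains v then isSingleCharacterLoop "T5" rest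
         else false) := by
  simp [isSingleCharacterLoop, pyState]

theorem loopMid (s : String) (hs : s = "T2" ∨ s = "T3" ∨ s = "T4" ∨ s = "T5")
    (v : Char) (rest : List Char) :
    isSingleCharacterLoop s (v :: rest)
      = if v == '\'' then isSingleCharacterLoop "T6" rest else false := by
  rcases hs with h | h | h | h <;> subst h <;>
    simp [isSingleCharacterLoop, pyState, pyQUOTE]

theorem loopT1nil : isSingleCharacterLoop "T1" [] = false := by decide
theorem loopT2nil : isSingleCharacterLoop "T2" [] = false := by decide
theorem loopT3nil : isSingleCharacterLoop "T3" [] = false := by decide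
theorem loopT4nil : isSingleCharacterLoop "T4" [] = false := by decide
theorem loopT5nil : isSingleCharacterLoop "T5" [] = false := by decide
theorem loopT6nil : isSingleCharacterLoop "T6" [] = true := by decide
theorem loopT6cons (v : Char) (rest : List Char) :
    isSingleCharacterLoop "T6" (v :: rest) = false := by
  simp [isSingleCharacterLoop, pyState]

set_option maxRecDepth 10000 in
theorem pyMIDDLE_eq : pyMIDDLE = pyZERO ++ pyNON_ZERO ++ pyALPHABET ++ pyWHITE_SPACE := by
  have h1 : pyMIDDLE
      = "0123456789abcdefghijklmnopqrstuvwxyzABCDEFGHIJKLMNOPQRSTUVWXYZ \t\n".toList := by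
    decide
  have h2 : pyZERO ++ pyNON_ZERO ++ pyALPHABET ++ pyWHITE_SPACE
      = "0123456789abcdefghijklmnopqrstuvwxyzABCDEFGHIJKLMNOPQRSTUVWXYZ \t\n".toList := rfl
  rw [h1, h2]

theorem mem_pyMIDDLE (b : Char) :
    PySem.Set.contains pyMIDDLE b
      = (pyZERO.contains b || pyNON_ZERO.contains b || pyALPHABET.contains b
          || pyWHITE_SPACE.contains b) := by
  rw [PySem.Set.contains_eq_listContains, pyMIDDLE_eq, Bool.eq_iff_iff]
  simp only [List.contains_iff_mem, List.mem_append, Bool.or_eq_true]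

theorem loop_eq_closed (cs : List Char) :
    isSingleCharacterLoop "T0" cs
      = (cs.length == 3 && cs.getD 0 ' ' == '\'' && cs.getD 2 ' ' == '\''
          && PySem.Set.contains pyMIDDLE (cs.getD 1 ' ')) := by
  match cs with
  | [] => decide
  | [a] =>
    rw [loopT0]
    cases ha : a == '\'' <;> simp [ha, loopT1nil]
  | [a, b] =>
    rw [loopT0]
    cases ha : a == '\''
    · simp [ha]
    · simp only [ha, if_pos]
      rw [loopT1]
      split_ifs <;> simp [loopT2nil, loopT3nil, loopT4nil, loopT5nil]
  | [a, b, c] =>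
    rw [loopT0, mem_pyMIDDLE]
    cases ha : a == '\''
    · simp [ha]
    · have ha' : a = '\'' := by simpa using ha
      simp only [ha, if_pos]
      rw [loopT1]
      split_ifs with h1 h2 h3 h4
      · rw [loopMid "T2" (by tauto)]
        have hb : b ∈ pyZERO := by simpa using h1
        cases hc : c == '\'' <;> simp [hc, ha', loopT6nil, hb]
      · rw [loopMid "T3" (by tauto)]
        have hb : b ∈ pyNON_ZERO := by simpa using h2
        cases hc : c == '\'' <;> simp [hc, ha', loopT6nil, hb]
      · rw [loopMid "T4" (by tauto)]
        have hb : b ∈ pyALPHABET := by simpa using h3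
        cases hc : c == '\'' <;> simp [hc, ha', loopT6nil, hb]
      · rw [loopMid "T5" (by tauto)]
        have hb : b ∈ pyWHITE_SPACE := by simpa using h4
        cases hc : c == '\'' <;> simp [hc, ha', loopT6nil, hb]
      · have hb1 : b ∉ pyZERO := by simpa using h1
        have hb2 : b ∉ pyNON_ZERO := by simpa using h2
        have hb3 : b ∉ pyALPHABET := by simpa using h3
        have hb4 : b ∉ pyWHITE_SPACE := by simpa using h4
        simp [ha', hb1, hb2, hb3, hb4]
  | a :: b :: c :: d :: rest =>
    rw [loopT0]
    have hlen : ((a :: b :: c :: d :: rest).length == 3) = false := by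
      simp
    cases ha : a == '\''
    · simp [ha, hlen]
    · simp only [ha, if_pos]
      rw [loopT1]
      split_ifs with h1 h2 h3 h4
      · rw [loopMid "T2" (by tauto)]
        cases hc : c == '\'' <;> simp [hc, hlen, loopT6cons]
      · rw [loopMid "T3" (by tauto)]
        cases hc : c == '\'' <;> simp [hc, hlen, loopT6cons]
      · rw [loopMid "T4" (by tauto)]
        cases hc : c == '\'' <;> simp [hc, hlen, loopT6cons]
      · rw [loopMid "T5" (by tauto)]
        cases hc : c == '\'' <;> simp [hc, hlen, loopT6cons]
      · simp [hlen, h1, h2, h3, h4]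

-- ===== VERDICT (by name: the statement is the Claim_ definition above) =====
theorem isSingleCharacter_spec : Claim_equal_isSingleCharacter := by
  intro token _
  unfold Spec_isSingleCharacter isSingleCharacter isSingleCharacter_alt
  have h0 : pyState.getD 0 "" = "T0" := rfl
  rw [h0]
  exact loop_eq_closed token.toList
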